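-- pv_equiv track=rewrite | github.com/pypa/hatch | src/hatch/cli/env/run.py | select_matrix_environments
-- ===== SOURCE A (Python) =====
-- def select_matrix_environments(environments, included_variables, excluded_variables):
--     selected_environments = []
--     for env_name, variables in environments.items():
--         included = set(variables)
--         excluded = set()
--
--         for variable, value in variables.items():
--             if variable in excluded_variables:
--                 excluded_values = excluded_variables[variable]
--                 if not excluded_values or value in excluded_values:
--                     excluded.add(variable)
--                     break
--
--             if included_variables:
--                 if variable not in included_variables:
--                     included.remove(variable)
--                 else:
--                     included_values = included_variables[variable]
--                     if included_values and value not in included_values: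
--                         included.remove(variable)
--
--         if included and not excluded:
--             selected_environments.append(env_name)
--
--     return selected_environments
-- ===== SOURCE B (Python) =====
-- def select_matrix_environments(environments, included_variables, excluded_variables):
--     def hits(rules, variables):
--         return any(
--             var in rules and (not rules[var] or value in rules[var])
--             for var, value in variables.items()
--         )
--
--     return [
--         env_name
--         for env_name, variables in environments.items()
--         if (hits(included_variables, variables) if included_variables else bool(variables))
--         and not hits(excluded_variables, variables)
--     ]
-- ===== Notes on version B (the rewrite author's own statement) =====
-- stated objective: simpler
-- what changed: B drops A's maintained sets (whittled-down 'included', accumulated 'excluded' with break) and expresses the filter as two existence predicates over variables.items(), selecting each environment with a single comprehension.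
import Mathlib
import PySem

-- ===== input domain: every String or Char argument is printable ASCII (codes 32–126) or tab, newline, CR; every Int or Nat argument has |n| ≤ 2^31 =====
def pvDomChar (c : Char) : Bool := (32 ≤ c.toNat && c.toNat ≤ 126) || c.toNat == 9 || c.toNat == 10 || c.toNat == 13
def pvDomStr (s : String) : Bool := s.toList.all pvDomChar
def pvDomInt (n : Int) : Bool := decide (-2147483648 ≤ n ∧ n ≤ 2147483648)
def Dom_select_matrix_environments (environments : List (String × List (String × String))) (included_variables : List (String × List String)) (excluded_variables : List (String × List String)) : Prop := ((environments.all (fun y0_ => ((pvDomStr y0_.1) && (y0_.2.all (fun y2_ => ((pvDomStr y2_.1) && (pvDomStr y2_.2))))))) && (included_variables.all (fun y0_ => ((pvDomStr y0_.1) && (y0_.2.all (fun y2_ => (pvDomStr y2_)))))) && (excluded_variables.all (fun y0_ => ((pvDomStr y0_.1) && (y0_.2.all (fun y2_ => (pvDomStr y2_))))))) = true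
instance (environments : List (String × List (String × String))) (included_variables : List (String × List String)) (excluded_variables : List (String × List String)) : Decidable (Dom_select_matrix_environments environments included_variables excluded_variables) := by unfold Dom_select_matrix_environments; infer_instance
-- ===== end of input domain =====

-- B replaces A's maintained per-environment sets (whittled 'included', accumulated 'excluded'
-- with break) by two existence predicates over the variable items; objective: simpler.

-- ===== PORT A =====
-- A's inner 'for variable, value in variables.items()' loop, carrying the (included, excluded)
-- sets; the 'break' is the early return in the first branch.
-- 'included.remove(variable)' is ported as Set.discard: 'variable' is a key of the variables
-- dict, dict keys are distinct and 'included' starts as the full key set, so the element is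
-- always present and Python's set.remove never raises here (discard is exact then).
def smeLoopA (incD excD : PySem.Dict String (List String)) :
    List (String × String) → PySem.Set String → PySem.Set String → PySem.Set String × PySem.Set String
  | [], included, excluded => (included, excluded)
  | (var, value) :: rest, included, excluded =>
    let excHit :=
      if excD.contains var then
        let excluded_values := excD.getD var []
        excluded_values.isEmpty || excluded_values.contains value
      else false
    if excHit then (included, PySem.Set.add excluded var)  -- break
    else
      let included' :=
        if incD.size != 0 then
          if !incD.contains var then PySem.Set.discard included var
          else
            let included_values := incD.getD var []
            if !included_values.isEmpty && !included_values.contains value then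
              PySem.Set.discard included var
            else included
        else included
      smeLoopA incD excD rest included' excluded

def select_matrix_environments (environments : List (String × List (String × String))) (included_variables : List (String × List String)) (excluded_variables : List (String × List String)) : List String :=
  let incD := PySem.Dict.ofList included_variables
  let excD := PySem.Dict.ofList excluded_variables
  (PySem.Dict.ofList environments).items.foldl
    (fun selected_environments p =>
      let varsD := PySem.Dict.ofList p.2
      let r := smeLoopA incD excD varsD.items (PySem.Set.ofList varsD.keys) []
      if !r.1.isEmpty && r.2.isEmpty then selected_environments ++ [p.1]
      else selected_environments)
    []

-- ===== PORT B =====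
-- hits(rules, variables): some variable item matches the rules dict
def smeHits (rules : PySem.Dict String (List String)) (vars : List (String × String)) : Bool :=
  vars.any (fun p =>
    rules.contains p.1 && ((rules.getD p.1 []).isEmpty || (rules.getD p.1 []).contains p.2))

def select_matrix_environments_alt (environments : List (String × List (String × String))) (included_variables : List (String × List String)) (excluded_variables : List (String × List String)) : List String :=
  let incD := PySem.Dict.ofList included_variables
  let excD := PySem.Dict.ofList excluded_variables
  ((PySem.Dict.ofList environments).items.filter (fun p =>
      let items := (PySem.Dict.ofList p.2).items
      (if incD.size != 0 then smeHits incD items else !items.isEmpty)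
        && !(smeHits excD items))).map (·.1)

-- ===== PRECONDITION & SPEC =====
def Spec_select_matrix_environments (environments : List (String × List (String × String))) (included_variables : List (String × List String)) (excluded_variables : List (String × List String)) (out : List String) : Prop := out = select_matrix_environments_alt environments included_variables excluded_variables
instance (environments : List (String × List (String × String))) (included_variables : List (String × List String)) (excluded_variables : List (String × List String)) (out : List String) : Decidable (Spec_select_matrix_environments environments included_variables excluded_variables out) := by unfold Spec_select_matrix_environments; infer_instance

-- ===== CLAIM (what is proved, stated in full; the proofs are below) =====
def Claim_equal_select_matrix_environments : Prop := ∀ (environments : List (String × List (String × String))) (included_variables : List (String × List String)) (excluded_variables : List (String × List String)), Dom_select_matrix_environments environments included_variables excluded_variables → Spec_select_matrix_environments environments included_variables excluded_variables (select_matrix_environments environments included_variables excluded_variables)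

-- ===== LEMMAS AND PROOFS =====

-- the per-item predicates A's loop decides
def smeExcB (excD : PySem.Dict String (List String)) (p : String × String) : Bool :=
  excD.contains p.1 && ((excD.getD p.1 []).isEmpty || (excD.getD p.1 []).contains p.2)

def smeKeep (incD : PySem.Dict String (List String)) (p : String × String) : Bool :=
  incD.size == 0 || (incD.contains p.1 && ((incD.getD p.1 []).isEmpty || (incD.getD p.1 []).contains p.2))

theorem smeHits_eq_any (d : PySem.Dict String (List String)) (vars : List (String × String)) :
    smeHits d vars = vars.any (smeExcB d) := rfl

-- A's per-item update of 'included', phrased through smeKeep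
theorem smeStep_eq (incD : PySem.Dict String (List String)) (var value : String)
    (included : PySem.Set String) :
    (if incD.size != 0 then
      if !incD.contains var then PySem.Set.discard included var
      else
        if !(incD.getD var []).isEmpty && !(incD.getD var []).contains value then
          PySem.Set.discard included var
        else included
     else included)
    = if smeKeep incD (var, value) then included else PySem.Set.discard included var := by
  simp only [smeKeep]
  by_cases hs : incD.size = 0
  · simp [hs]
  · by_cases hc : incD.contains var = true
    · by_cases he : (incD.getD var []).isEmpty = true
      · simp [hs, hc, he]
      · by_cases hm : value ∈ incD.getD var []
        · simp [hs, hc, hm]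
        · simp [hs, hc, he, hm]
    · simp [hs, hc]

-- A's loop characterised: the excluded set stays empty iff no item hits excD, and in that
-- case 'included' is the fold that discards the non-kept keys.
theorem smeLoopA_spec (incD excD : PySem.Dict String (List String)) :
    ∀ (vars : List (String × String)) (included : PySem.Set String),
      ((smeLoopA incD excD vars included []).2.isEmpty = !vars.any (smeExcB excD)) ∧
      (vars.any (smeExcB excD) = false →
        (smeLoopA incD excD vars included []).1 =
          vars.foldl (fun s p => if smeKeep incD p then s else PySem.Set.discard s p.1) included) := by
  intro vars
  induction vars with
  | nil => intro included; simp [smeLoopA]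
  | cons p rest ih =>
    intro included
    obtain ⟨var, value⟩ := p
    have hcond : (if excD.contains var then
        ((excD.getD var []).isEmpty || (excD.getD var []).contains value) else false)
        = smeExcB excD (var, value) := by
      simp [smeExcB, Bool.if_false_right]
    cases hx : smeExcB excD (var, value)
    · have hunfold : smeLoopA incD excD ((var, value) :: rest) included [] =
          smeLoopA incD excD rest
            (if smeKeep incD (var, value) then included else PySem.Set.discard included var) [] := by
        simp only [smeLoopA, hcond, hx, smeStep_eq]
        rw [if_neg]; simp
      constructor
      · rw [hunfold, (ih _).1]
        simp [List.any_cons, hx]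
      · intro h
        simp only [List.any_cons, hx, Bool.false_or] at h
        rw [hunfold, (ih _).2 h]
        simp
    · constructor
      · simp only [smeLoopA, hcond, hx]
        simp [PySem.Set.add, List.any_cons, hx]
      · intro h
        simp [List.any_cons, hx] at h

-- membership in the discard fold
theorem mem_foldl_discard (incD : PySem.Dict String (List String)) :
    ∀ (vars : List (String × String)) (s : PySem.Set String) (x : String),
      x ∈ vars.foldl (fun s p => if smeKeep incD p then s else PySem.Set.discard s p.1) s ↔
        x ∈ s ∧ ∀ p ∈ vars, smeKeep incD p = true ∨ p.1 ≠ x := by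
  intro vars
  induction vars with
  | nil => simp
  | cons p rest ih =>
    intro s x
    simp only [List.foldl_cons]
    by_cases hk : smeKeep incD p = true
    · rw [if_pos hk, ih]
      constructor
      · rintro ⟨hs, h⟩
        refine ⟨hs, fun q hq => ?_⟩
        rcases List.mem_cons.mp hq with rfl | hq
        · exact Or.inl hk
        · exact h q hq
      · rintro ⟨hs, h⟩; exact ⟨hs, fun q hq => h q (by simp [hq])⟩
    · rw [if_neg hk, ih]
      constructor
      · rintro ⟨hs, h⟩
        rw [PySem.Set.mem_discard] at hs
        refine ⟨hs.1, fun q hq => ?_⟩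
        rcases List.mem_cons.mp hq with rfl | hq
        · exact Or.inr (Ne.symm hs.2)
        · exact h q hq
      · rintro ⟨hs, h⟩
        refine ⟨(PySem.Set.mem_discard ..).mpr ⟨hs, ?_⟩, fun q hq => h q (by simp [hq])⟩
        rcases h p (by simp) with h' | h'
        · exact absurd h' hk
        · exact Ne.symm h'

-- the two per-environment decisions coincide
theorem sme_perEnv (incD excD : PySem.Dict String (List String))
    (vs : List (String × String)) :
    (let varsD := PySem.Dict.ofList vs
     let r := smeLoopA incD excD varsD.items (PySem.Set.ofList varsD.keys) []
     (!r.1.isEmpty && r.2.isEmpty))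
    = ((if incD.size != 0 then smeHits incD (PySem.Dict.ofList vs).items
        else !(PySem.Dict.ofList vs).items.isEmpty)
       && !(smeHits excD (PySem.Dict.ofList vs).items)) := by
  simp only []
  set items := (PySem.Dict.ofList vs).items with hitems
  have hnd : (items.map (·.1)).Nodup := PySem.Dict.nodup_keys_ofList vs
  have hkeys : (PySem.Dict.ofList vs).keys = items.map (·.1) := rfl
  have hset : PySem.Set.ofList ((PySem.Dict.ofList vs).keys) = items.map (·.1) := by
    rw [hkeys]; exact PySem.Set.ofList_eq_self_of_nodup _ hnd
  rw [hset, smeHits_eq_any excD]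
  cases hx : items.any (smeExcB excD)
  · -- no exclusion hit
    rw [(smeLoopA_spec incD excD items _).2 hx]
    have h2 : (smeLoopA incD excD items (items.map (·.1)) []).2.isEmpty = true := by
      rw [(smeLoopA_spec incD excD items _).1, hx]; rfl
    rw [h2]
    simp only [Bool.and_true, Bool.not_false]
    by_cases hs : incD.size = 0
    · -- included_variables empty: nothing is discarded
      have hfold : items.foldl
          (fun s p => if smeKeep incD p then s else PySem.Set.discard s p.1) (items.map (·.1))
          = items.map (·.1) := by
        have : ∀ (l : List (String × String)) (s : PySem.Set String),
            l.foldl (fun s p => if smeKeep incD p then s else PySem.Set.discard s p.1) s = s := by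
          intro l
          induction l with
          | nil => intro s; rfl
          | cons q t iht =>
            intro s
            have hq : smeKeep incD q = true := by simp [smeKeep, hs]
            simp only [List.foldl_cons, hq, if_true]
            exact iht s
        exact this items _
      rw [hfold]
      simp [hs]
    · -- included_variables nonempty: nonemptiness of the fold = existence of a kept item
      have hsz : (incD.size != 0) = true := by simpa using hs
      rw [if_pos (by simpa using hsz), smeHits_eq_any incD]
      have hkk : ∀ p : String × String, smeKeep incD p = smeExcB incD p := by
        intro p; simp [smeKeep, smeExcB, hs]
      rw [Bool.eq_iff_iff]
      simp only [Bool.not_eq_eq_eq_not, Bool.not_true, List.isEmpty_eq_false_iff,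
        List.any_eq_true]
      constructor
      · intro hne
        rcases List.exists_mem_of_ne_nil _ (by simpa [List.isEmpty_iff] using hne) with ⟨x, hxmem⟩
        rw [mem_foldl_discard] at hxmem
        obtain ⟨hxk, hall⟩ := hxmem
        rcases List.mem_map.mp hxk with ⟨q, hq, rfl⟩
        rcases hall q hq with h' | h'
        · exact ⟨q, hq, by rw [← hkk]; exact h'⟩
        · exact absurd rfl h'
      · rintro ⟨q, hq, hkeep⟩
        have : q.1 ∈ items.foldl
            (fun s p => if smeKeep incD p then s else PySem.Set.discard s p.1) (items.map (·.1)) := by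
          rw [mem_foldl_discard]
          refine ⟨List.mem_map.mpr ⟨q, hq, rfl⟩, fun p hp => ?_⟩
          by_cases hpq : p.1 = q.1
          · have : p = q := List.inj_on_of_nodup_map hnd hp hq hpq
            subst this
            exact Or.inl (by rw [hkk]; exact hkeep)
          · exact Or.inr hpq
        simp [List.eq_nil_iff_forall_not_mem]
        exact ⟨q.1, this⟩
  · -- some exclusion hit: both sides false
    have h2 : (smeLoopA incD excD items (List.map (fun x => x.1) items) []).2.isEmpty = false := by
      rw [(smeLoopA_spec incD excD items _).1, hx]; rfl
    rw [h2]
    simp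

-- ===== VERDICT (by name: the statement is the Claim_ definition above) =====
theorem select_matrix_environments_spec : Claim_equal_select_matrix_environments := by
  intro environments included_variables excluded_variables _
  unfold Spec_select_matrix_environments select_matrix_environments select_matrix_environments_alt
  simp only []
  rw [PySem.List.foldl_append_if
    (fun p : String × List (String × String) =>
      let varsD := PySem.Dict.ofList p.2
      let r := smeLoopA (PySem.Dict.ofList included_variables) (PySem.Dict.ofList excluded_variables)
        varsD.items (PySem.Set.ofList varsD.keys) []
      (!r.1.isEmpty && r.2.isEmpty))
    (fun p => p.1)]
  simp only [List.nil_append]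
  congr 1
  apply List.filter_congr
  intro p _
  exact sme_perEnv _ _ p.2
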